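-- pv_equiv track=rewrite | github.com/Kavexa/OMNIS3.0 | school_data.py | get_rule_based_answer
-- ===== SOURCE A (Python) =====
-- CUSTOM_QA = {
--     # ATTENDANCE & TIME RULES
--     "What is the assembly time?": "Daily morning assembly is at 8:45 AM sharp.",
--     "When am I marked late?": "Students arriving after 8:30 AM are marked as late.",
--     "What is the attendance requirement?": "You need minimum 95% attendance to continue in school.",
--     "What happens if I'm absent?": "Your parents will be notified within 2 hours of your absence.",
--
--     # UNIFORM RULES
--     "What is the dress code?": "Full school uniform is compulsory Monday to Friday. Uniform includes shirt/blouse, tie, trousers/skirt, and black leather shoes.",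
--     "When can I wear PE uniform?": "PE uniform is only worn on designated sports days as per the timetable.",
--     "What about formal events?": "Formal attire must be worn for assemblies, ceremonies, and special events.",
--     "What shoes should I wear?": "Only black leather shoes are permitted. No colored or casual shoes.",
--
--     # MOBILE PHONE & CONDUCT RULES
--     "Can I bring my mobile phone to school?": "No, mobile phones are not permitted during school hours. Any phones found will be confiscated and returned to parents.",
--     "What is the bullying policy?": "MGM has a zero-tolerance policy on bullying. Any bullying will result in immediate disciplinary action.",
--     "What language should I speak in class?": "Only English or Malayalam is permitted in class. No other languages.",
--     "How should I behave?": "Always show respectful conduct towards all staff and peers. Use polite language and follow instructions.",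
--
--     # LATE & LEAVE PROCEDURES
--     "What should I do if I'm late for school?": "Report to the main office with a note from your parent. You will be marked as late in your record.",
--     "How do I request leave?": "Submit a leave form to your class teacher at least 3 days in advance. Medical certificates are required for sick leave longer than 2 days.",
--     "What is the emergency leave process?": "For emergency situations, call the school office immediately. Parent notification is compulsory within the same day.",
--
--     # FEE PAYMENT RULES
--     "When are fees due?": "School fees must be paid by the 5th of each month.",
--     "What if I pay late?": "Late payment will incur a 5% late charge. Please pay on time to avoid penalties.",
--     "How do I pay fees?": "Fees can be paid via online bank transfer or cheque. Always request a receipt for your records.",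
--
--     # SAFETY & LABORATORY RULES
--     "What are the laboratory safety rules?": "Lab access is only permitted with teacher supervision. Always wear safety goggles and follow all instructions exactly.",
--     "What if I don't follow lab rules?": "Non-compliance with lab safety rules will result in suspension from lab access and disciplinary action.",
--     "What medical facilities are available?": "A qualified school nurse is available 8 AM to 4 PM daily. Report any injuries or health issues immediately.",
--
--     # BULLYING & DISCIPLINE
--     "What should I do if I'm being bullied?": "Report immediately to any teacher, counselor, or the principal. All complaints will be investigated and appropriate action taken.",
--     "What is the grievance procedure?": "First speak to your class teacher. If unresolved, contact the administrator. For formal complaints, submit a written request to the principal.",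
--     "How long does grievance resolution take?": "The Grievance Redressal Committee reviews all complaints and aims to resolve within 30 days.",
--
--     # LIBRARY & STUDY FACILITIES
--     "What are the library hours?": "The library is open from 8:00 AM to 4:00 PM on all school days.",
--     "How long can I keep books?": "Books can be issued for 2 weeks. You can renew if no one else has requested the book.",
--     "Are there digital resources?": "Yes, we have three digital libraries with e-books and online resources available to all students.",
--
--     # SPORTS & ACTIVITIES
--     "Do I have to participate in sports?": "Yes, all students must participate in at least one sport or physical activity per week.",
--     "What sports facilities are available?": "We have a basketball court, volleyball court, badminton facilities, and sports equipment for various activities.",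
--     "Are there extracurricular activities?": "Yes, students can join various clubs including debate, music, arts, STEM, and community service.",
--
--     # CANTEEN & FOOD
--     "What is the canteen policy?": "Only healthy food is served in the canteen. Junk food is strictly prohibited.",
--     "Are there special meals for allergies?": "Yes, please inform the canteen manager and principal of any food allergies for special arrangements.",
--
--     # CONTACT & ADMINISTRATION
--     "Who is the principal?": "Dr Pooja S is our principal. Office hours are 8:30 AM to 4:00 PM.",
--     "How do I contact the school?": "Call the main office or visit the school during office hours. Email queries can be sent to the school website.",
--     "Is there a school counselor?": "Yes, a qualified counselor is available for student support, academic guidance, and personal counseling.",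
-- }
--
-- def get_rule_based_answer(question: str) -> str:
--     """
--     Check CUSTOM_QA for exact or close rule-based matches
--     Returns answer if found, else None
--
--     Uses 2-tier matching:
--     1. Exact substring match (strict)
--     2. Keyword matching with higher threshold (requires 50%+ keyword match)
--     """
--     question_lower = question.lower().strip()
--
--     # First try exact substring match (one string fully contains the other)
--     for qa_question, qa_answer in CUSTOM_QA.items():
--         qa_lower = qa_question.lower()
--         # Check if question contains the Q&A question or vice versa
--         if qa_lower in question_lower:
--             return qa_answer
--
--     # Try keyword matching with higher threshold
--     for qa_question, qa_answer in CUSTOM_QA.items():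
--         qa_lower = qa_question.lower()
--         keywords = [kw for kw in qa_lower.split() if len(kw) > 3]  # Only keywords > 3 chars
--         if not keywords:
--             continue
--
--         match_count = sum(1 for kw in keywords if kw in question_lower)
--         match_ratio = match_count / len(keywords)
--
--         # Require 50%+ keyword match (not just 2 keywords)
--         if match_ratio >= 0.5 and match_count >= 2:
--             return qa_answer
--
--     return None
-- ===== SOURCE B (Python) =====
-- CUSTOM_QA = {
--     "What is the assembly time?": "Daily morning assembly is at 8:45 AM sharp.",
--     "When am I marked late?": "Students arriving after 8:30 AM are marked as late.",
--     "What is the attendance requirement?": "You need minimum 95% attendance to continue in school.",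
--     "What happens if I'm absent?": "Your parents will be notified within 2 hours of your absence.",
--     "What is the dress code?": "Full school uniform is compulsory Monday to Friday. Uniform includes shirt/blouse, tie, trousers/skirt, and black leather shoes.",
--     "When can I wear PE uniform?": "PE uniform is only worn on designated sports days as per the timetable.",
--     "What about formal events?": "Formal attire must be worn for assemblies, ceremonies, and special events.",
--     "What shoes should I wear?": "Only black leather shoes are permitted. No colored or casual shoes.",
--     "Can I bring my mobile phone to school?": "No, mobile phones are not permitted during school hours. Any phones found will be confiscated and returned to parents.",
--     "What is the bullying policy?": "MGM has a zero-tolerance policy on bullying. Any bullying will result in immediate disciplinary action.",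
--     "What language should I speak in class?": "Only English or Malayalam is permitted in class. No other languages.",
--     "How should I behave?": "Always show respectful conduct towards all staff and peers. Use polite language and follow instructions.",
--     "What should I do if I'm late for school?": "Report to the main office with a note from your parent. You will be marked as late in your record.",
--     "How do I request leave?": "Submit a leave form to your class teacher at least 3 days in advance. Medical certificates are required for sick leave longer than 2 days.",
--     "What is the emergency leave process?": "For emergency situations, call the school office immediately. Parent notification is compulsory within the same day.",
--     "When are fees due?": "School fees must be paid by the 5th of each month.",
--     "What if I pay late?": "Late payment will incur a 5% late charge. Please pay on time to avoid penalties.",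
--     "How do I pay fees?": "Fees can be paid via online bank transfer or cheque. Always request a receipt for your records.",
--     "What are the laboratory safety rules?": "Lab access is only permitted with teacher supervision. Always wear safety goggles and follow all instructions exactly.",
--     "What if I don't follow lab rules?": "Non-compliance with lab safety rules will result in suspension from lab access and disciplinary action.",
--     "What medical facilities are available?": "A qualified school nurse is available 8 AM to 4 PM daily. Report any injuries or health issues immediately.",
--     "What should I do if I'm being bullied?": "Report immediately to any teacher, counselor, or the principal. All complaints will be investigated and appropriate action taken.",
--     "What is the grievance procedure?": "First speak to your class teacher. If unresolved, contact the administrator. For formal complaints, submit a written request to the principal.",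
--     "How long does grievance resolution take?": "The Grievance Redressal Committee reviews all complaints and aims to resolve within 30 days.",
--     "What are the library hours?": "The library is open from 8:00 AM to 4:00 PM on all school days.",
--     "How long can I keep books?": "Books can be issued for 2 weeks. You can renew if no one else has requested the book.",
--     "Are there digital resources?": "Yes, we have three digital libraries with e-books and online resources available to all students.",
--     "Do I have to participate in sports?": "Yes, all students must participate in at least one sport or physical activity per week.",
--     "What sports facilities are available?": "We have a basketball court, volleyball court, badminton facilities, and sports equipment for various activities.",
--     "Are there extracurricular activities?": "Yes, students can join various clubs including debate, music, arts, STEM, and community service.",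
--     "What is the canteen policy?": "Only healthy food is served in the canteen. Junk food is strictly prohibited.",
--     "Are there special meals for allergies?": "Yes, please inform the canteen manager and principal of any food allergies for special arrangements.",
--     "Who is the principal?": "Dr Pooja S is our principal. Office hours are 8:30 AM to 4:00 PM.",
--     "How do I contact the school?": "Call the main office or visit the school during office hours. Email queries can be sent to the school website.",
--     "Is there a school counselor?": "Yes, a qualified counselor is available for student support, academic guidance, and personal counseling.",
-- }
--
--
-- def get_rule_based_answer(question: str) -> str:
--     """Single pass over CUSTOM_QA: return on the first substring match,
--     otherwise remember the first keyword match and return it at the end."""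
--     question_lower = question.lower().strip()
--     candidate = None
--     for qa_question, qa_answer in CUSTOM_QA.items():
--         qa_lower = qa_question.lower()
--         if qa_lower in question_lower:
--             # Substring matches always win, in dict order.
--             return qa_answer
--         if candidate is None:
--             keywords = [kw for kw in qa_lower.split() if len(kw) > 3]
--             hits = sum(kw in question_lower for kw in keywords)
--             # hits/len(keywords) >= 0.5 as exact integer arithmetic
--             if hits >= 2 and 2 * hits >= len(keywords):
--                 candidate = qa_answer
--     return candidate
-- ===== Notes on version B (the rewrite author's own statement) =====
-- stated objective: simpler
-- what changed: Replaces A's two sequential full scans of CUSTOM_QA with a single pass that returns a substring match immediately and carries the first keyword match as a candidate returned after the loop.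
import Mathlib
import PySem

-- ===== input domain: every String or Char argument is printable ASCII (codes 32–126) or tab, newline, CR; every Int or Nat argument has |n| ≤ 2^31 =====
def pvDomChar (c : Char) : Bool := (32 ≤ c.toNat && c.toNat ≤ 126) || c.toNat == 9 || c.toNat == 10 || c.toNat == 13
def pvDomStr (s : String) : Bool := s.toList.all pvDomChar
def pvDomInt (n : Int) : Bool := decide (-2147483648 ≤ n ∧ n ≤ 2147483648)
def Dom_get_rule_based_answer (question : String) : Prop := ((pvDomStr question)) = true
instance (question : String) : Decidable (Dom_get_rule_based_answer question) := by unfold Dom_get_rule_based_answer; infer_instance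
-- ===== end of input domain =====

-- B replaces A's two sequential scans of CUSTOM_QA by a single pass that returns
-- substring matches immediately and carries the first keyword-match as a candidate
-- (objective: simpler — one loop instead of two).

-- The module constant CUSTOM_QA (a dict, ported as an association list in insertion order).
def CUSTOM_QA : List (String × String) := [
  ("What is the assembly time?", "Daily morning assembly is at 8:45 AM sharp."),
  ("When am I marked late?", "Students arriving after 8:30 AM are marked as late."),
  ("What is the attendance requirement?", "You need minimum 95% attendance to continue in school."),
  ("What happens if I'm absent?", "Your parents will be notified within 2 hours of your absence."),
  ("What is the dress code?", "Full school uniform is compulsory Monday to Friday. Uniform includes shirt/blouse, tie, trousers/skirt, and black leather shoes."),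
  ("When can I wear PE uniform?", "PE uniform is only worn on designated sports days as per the timetable."),
  ("What about formal events?", "Formal attire must be worn for assemblies, ceremonies, and special events."),
  ("What shoes should I wear?", "Only black leather shoes are permitted. No colored or casual shoes."),
  ("Can I bring my mobile phone to school?", "No, mobile phones are not permitted during school hours. Any phones found will be confiscated and returned to parents."),
  ("What is the bullying policy?", "MGM has a zero-tolerance policy on bullying. Any bullying will result in immediate disciplinary action."),
  ("What language should I speak in class?", "Only English or Malayalam is permitted in class. No other languages."),
  ("How should I behave?", "Always show respectful conduct towards all staff and peers. Use polite language and follow instructions."),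
  ("What should I do if I'm late for school?", "Report to the main office with a note from your parent. You will be marked as late in your record."),
  ("How do I request leave?", "Submit a leave form to your class teacher at least 3 days in advance. Medical certificates are required for sick leave longer than 2 days."),
  ("What is the emergency leave process?", "For emergency situations, call the school office immediately. Parent notification is compulsory within the same day."),
  ("When are fees due?", "School fees must be paid by the 5th of each month."),
  ("What if I pay late?", "Late payment will incur a 5% late charge. Please pay on time to avoid penalties."),
  ("How do I pay fees?", "Fees can be paid via online bank transfer or cheque. Always request a receipt for your records."),
  ("What are the laboratory safety rules?", "Lab access is only permitted with teacher supervision. Always wear safety goggles and follow all instructions exactly."),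
  ("What if I don't follow lab rules?", "Non-compliance with lab safety rules will result in suspension from lab access and disciplinary action."),
  ("What medical facilities are available?", "A qualified school nurse is available 8 AM to 4 PM daily. Report any injuries or health issues immediately."),
  ("What should I do if I'm being bullied?", "Report immediately to any teacher, counselor, or the principal. All complaints will be investigated and appropriate action taken."),
  ("What is the grievance procedure?", "First speak to your class teacher. If unresolved, contact the administrator. For formal complaints, submit a written request to the principal."),
  ("How long does grievance resolution take?", "The Grievance Redressal Committee reviews all complaints and aims to resolve within 30 days."),
  ("What are the library hours?", "The library is open from 8:00 AM to 4:00 PM on all school days."),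
  ("How long can I keep books?", "Books can be issued for 2 weeks. You can renew if no one else has requested the book."),
  ("Are there digital resources?", "Yes, we have three digital libraries with e-books and online resources available to all students."),
  ("Do I have to participate in sports?", "Yes, all students must participate in at least one sport or physical activity per week."),
  ("What sports facilities are available?", "We have a basketball court, volleyball court, badminton facilities, and sports equipment for various activities."),
  ("Are there extracurricular activities?", "Yes, students can join various clubs including debate, music, arts, STEM, and community service."),
  ("What is the canteen policy?", "Only healthy food is served in the canteen. Junk food is strictly prohibited."),
  ("Are there special meals for allergies?", "Yes, please inform the canteen manager and principal of any food allergies for special arrangements."),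
  ("Who is the principal?", "Dr Pooja S is our principal. Office hours are 8:30 AM to 4:00 PM."),
  ("How do I contact the school?", "Call the main office or visit the school during office hours. Email queries can be sent to the school website."),
  ("Is there a school counselor?", "Yes, a qualified counselor is available for student support, academic guidance, and personal counseling.")]

-- ===== PORT A =====
-- First loop of A: return the answer of the first entry whose lowered question is a substring.
def pvScanSubA (ql : String) : List (String × String) → Option String
  | [] => none
  | (qaQ, qaA) :: rest =>
      if PySem.Str.isIn (PySem.Str.lower qaQ) ql then some qaA else pvScanSubA ql rest

-- Second loop of A.  Python compares match_count/len(keywords) >= 0.5 in floats; since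
-- 0.5 is exactly representable and len(keywords) is small, that float test is exactly
-- the integer test len(keywords) ≤ 2*match_count, which is how it is ported here.
def pvScanKwA (ql : String) : List (String × String) → Option String
  | [] => none
  | (qaQ, qaA) :: rest =>
      let keywords := (PySem.Str.split₀ (PySem.Str.lower qaQ)).filter (fun kw => 3 < PySem.Str.len kw)
      if keywords.isEmpty then pvScanKwA ql rest
      else
        let matchCount := keywords.countP (fun kw => PySem.Str.isIn kw ql)
        if keywords.length ≤ 2 * matchCount ∧ 2 ≤ matchCount then some qaA
        else pvScanKwA ql rest

def get_rule_based_answer (question : String) : Option String :=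
  let questionLower := PySem.Str.strip (PySem.Str.lower question)
  match pvScanSubA questionLower CUSTOM_QA with
  | some a => some a
  | none => pvScanKwA questionLower CUSTOM_QA

-- ===== PORT B =====
-- Single pass with a held candidate (Source B's loop).
def pvLoopB (ql : String) (cand : Option String) : List (String × String) → Option String
  | [] => cand
  | (qaQ, qaA) :: rest =>
      let qaLower := PySem.Str.lower qaQ
      if PySem.Str.isIn qaLower ql then some qaA
      else
        let cand' :=
          if cand.isNone then
            let kws := (PySem.Str.split₀ qaLower).filter (fun kw => 3 < PySem.Str.len kw)
            let hits := kws.countP (fun kw => PySem.Str.isIn kw ql)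
            if 2 ≤ hits ∧ kws.length ≤ 2 * hits then some qaA else cand
          else cand
        pvLoopB ql cand' rest

def get_rule_based_answer_alt (question : String) : Option String :=
  pvLoopB (PySem.Str.strip (PySem.Str.lower question)) none CUSTOM_QA

-- ===== PRECONDITION & SPEC =====
def Spec_get_rule_based_answer (question : String) (out : Option String) : Prop := out = get_rule_based_answer_alt question
instance (question : String) (out : Option String) : Decidable (Spec_get_rule_based_answer question out) := by unfold Spec_get_rule_based_answer; infer_instance

-- ===== CLAIM (what is proved, stated in full; the proofs are below) =====
def Claim_equal_get_rule_based_answer : Prop := ∀ (question : String), Dom_get_rule_based_answer question → Spec_get_rule_based_answer question (get_rule_based_answer question)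

-- ===== LEMMAS AND PROOFS =====
-- Invariant of B's single pass: it returns the first substring match if one exists,
-- otherwise the held candidate if any, otherwise the first keyword match.
theorem pvLoopB_eq (ql : String) : ∀ (l : List (String × String)) (cand : Option String),
    pvLoopB ql cand l =
      match pvScanSubA ql l with
      | some a => some a
      | none => match cand with
        | some c => some c
        | none => pvScanKwA ql l := by
  intro l
  induction l with
  | nil => intro cand; cases cand <;> rfl
  | cons p rest ih =>
      intro cand
      obtain ⟨qaQ, qaA⟩ := p
      simp only [pvLoopB, pvScanSubA, pvScanKwA]
      by_cases hsub : PySem.Str.isIn (PySem.Str.lower qaQ) ql = true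
      · simp only [if_pos hsub]
      · rw [Bool.not_eq_true] at hsub
        simp only [hsub, Bool.false_eq_true, if_false]
        cases cand with
        | some c =>
            simp only [Option.isNone_some, Bool.false_eq_true, if_false]
            rw [ih]
        | none =>
            simp only [Option.isNone_none, if_true]
            generalize hK : List.filter (fun kw => decide (3 < PySem.Str.len kw)) (PySem.Str.split₀ (PySem.Str.lower qaQ)) = kws
            generalize hC : List.countP (fun kw => PySem.Str.isIn kw ql) kws = cnt
            by_cases hcond : 2 ≤ cnt ∧ kws.length ≤ 2 * cnt
            · rw [if_pos hcond, ih]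
              have hcle : cnt ≤ kws.length := hC ▸ List.countP_le_length
              have hlen : 2 ≤ kws.length := le_trans hcond.1 hcle
              have hne : kws.isEmpty = false := by
                cases kws with
                | nil => simp at hlen
                | cons a b => rfl
              have hcond' : kws.length ≤ 2 * cnt ∧ 2 ≤ cnt := ⟨hcond.2, hcond.1⟩
              cases h : pvScanSubA ql rest <;> simp [hne, hcond']
            · rw [if_neg hcond, ih]
              have hcond' : ¬ (kws.length ≤ 2 * cnt ∧ 2 ≤ cnt) := fun h => hcond ⟨h.2, h.1⟩
              cases h : pvScanSubA ql rest <;>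
                by_cases hemp : kws.isEmpty = true <;> simp [hemp, hcond']

-- ===== VERDICT (by name: the statement is the Claim_ definition above) =====
theorem get_rule_based_answer_spec : Claim_equal_get_rule_based_answer := by
  intro question _
  unfold Spec_get_rule_based_answer get_rule_based_answer get_rule_based_answer_alt
  rw [pvLoopB_eq]
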